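-- pv_equiv track=rewrite | github.com/sbegin0/SlackFormat | slackformat/utils.py | split_text_by_delimiter
-- ===== SOURCE A (Python) =====
-- from typing import Dict, List, Any, Union, Optional
--
-- def split_text_by_delimiter(text: str, delimiter: str) -> List[str]:
--     """Split text by delimiter, handling escaped delimiters."""
--     parts = []
--     current = ""
--     i = 0
--
--     while i < len(text):
--         if text[i:i+len(delimiter)] == delimiter:
--             # Check if it's escaped
--             if i > 0 and text[i-1] == '\\':
--                 # Escaped delimiter, add to current
--                 current = current[:-1] + delimiter  # Remove backslash
--             else:
--                 # Real delimiter, split here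
--                 parts.append(current)
--                 current = ""
--             i += len(delimiter)
--         else:
--             current += text[i]
--             i += 1
--
--     # Add remaining text
--     if current:
--         parts.append(current)
--
--     return parts
-- ===== SOURCE B (Python) =====
-- def split_text_by_delimiter(text, delimiter):
--     """Split text by delimiter, handling escaped delimiters."""
--     L = len(delimiter)
--     # Phase 1: index all greedy non-overlapping delimiter occurrences up front.
--     cuts = []
--     i = 0
--     while i < len(text):
--         j = text.find(delimiter, i)
--         if j == -1:
--             break
--         cuts.append((j, j > 0 and text[j - 1] == '\\'))
--         i = j + L
--     # Phase 2: fold over the occurrence index, slicing whole segments.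
--     parts = []
--     current = ""
--     prev = 0
--     for j, esc in cuts:
--         chunk = text[prev:j]
--         if esc:
--             current = (current + chunk)[:-1] + delimiter
--         else:
--             parts.append(current + chunk)
--             current = ""
--         prev = j + L
--     current += text[prev:]
--     if current:
--         parts.append(current)
--     return parts
-- ===== Notes on version B (the rewrite author's own statement) =====
-- stated objective: faster
-- what changed: B is a staged two-pass algorithm: phase 1 builds an index of all greedy delimiter occurrences (position + escaped flag) with C-level str.find, phase 2 folds over that index slicing whole segments; A interleaves everything in one per-character scan that compares a fresh len(delimiter)-slice at every position.
import Mathlib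
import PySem

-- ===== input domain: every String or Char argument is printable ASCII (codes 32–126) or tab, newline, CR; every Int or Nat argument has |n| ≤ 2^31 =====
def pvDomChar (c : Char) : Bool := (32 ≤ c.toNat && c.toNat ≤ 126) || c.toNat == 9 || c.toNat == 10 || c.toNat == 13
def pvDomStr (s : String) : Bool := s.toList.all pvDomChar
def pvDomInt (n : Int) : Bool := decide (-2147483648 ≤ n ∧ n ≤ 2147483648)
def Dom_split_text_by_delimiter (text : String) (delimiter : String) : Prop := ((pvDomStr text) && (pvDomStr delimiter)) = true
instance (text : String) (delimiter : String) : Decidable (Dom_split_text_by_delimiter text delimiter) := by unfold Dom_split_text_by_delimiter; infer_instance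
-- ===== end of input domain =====

-- A scans char by char comparing a delimiter-length slice at every position; B is a staged
-- two-pass algorithm (build an occurrence index with str.find, then fold over it slicing whole
-- segments), faster by whole-segment work instead of per-character work.


-- ===== PORT A =====
-- Literal port of A's while loop over character index i.
-- The 'd = []' branch is ONLY a totality guard: with delimiter '' and nonempty text the Python
-- loop never advances i and never returns; Pre_ excludes those inputs.
def loopA_split (t d : List Char) (i : Nat) (parts : List (List Char)) (cur : List Char) :
    List (List Char) × List Char :=
  if hd : d = [] then (parts, cur)
  else if hi : i < t.length then
    -- text[i:i+len(delimiter)] == delimiter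
    if PySem.List.slice t (some (i : Int)) (some ((i : Int) + (d.length : Int))) = d then
      -- i > 0 and text[i-1] == '\\'
      if 0 < i ∧ PySem.List.pyGet? t ((i : Int) - 1) = some '\\' then
        -- current = current[:-1] + delimiter
        loopA_split t d (i + d.length) parts (PySem.List.slice cur none (some (-1)) ++ d)
      else
        loopA_split t d (i + d.length) (parts ++ [cur]) []
    else
      -- current += text[i]  (index i is in range by the loop guard)
      loopA_split t d (i + 1) parts (cur ++ [t[i]])
  else (parts, cur)
termination_by t.length - i
decreasing_by
  · have : 0 < d.length := List.length_pos_iff.mpr hd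
    omega
  · have : 0 < d.length := List.length_pos_iff.mpr hd
    omega
  · omega

def split_text_by_delimiter (text : String) (delimiter : String) : List String :=
  let r := loopA_split text.toList delimiter.toList 0 [] []
  -- if current: parts.append(current)
  (if r.2 ≠ [] then r.1 ++ [r.2] else r.1).map fun l => String.ofList l

-- ===== PORT B =====
-- Phase 1 of B: the occurrence index — (position, escaped?) of each greedy delimiter
-- occurrence, located with text.find (PySem.Chars.findFrom).
-- The 'd = []' branch is ONLY a totality guard (same non-returning Python inputs, excluded by Pre_).
def occsB_split (t d : List Char) (i : Nat) : List (Nat × Bool) :=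
  if hd : d = [] then []
  else if hi : i < t.length then
    -- j = text.find(delimiter, i)
    let j := PySem.Chars.findFrom t d ((i : Int)) none
    if hj : j = -1 then []
    else (j.toNat, decide (0 < j ∧ PySem.List.pyGet? t (j - 1) = some '\\')) ::
         occsB_split t d (j.toNat + d.length)
  else []
termination_by t.length - i
decreasing_by
  have h1 := (PySem.Chars.findFrom_natCast_spec t d i (Nat.le_of_lt hi) hj).1
  have h2 : 0 < d.length := List.length_pos_iff.mpr hd
  omega

-- Phase 2 of B: one fold step over the index; state = (parts, current, prev).
def stepB_split (t d : List Char) (st : List (List Char) × List Char × Nat) (c : Nat × Bool) :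
    List (List Char) × List Char × Nat :=
  -- chunk = text[prev:j]
  let chunk := PySem.List.slice t (some (st.2.2 : Int)) (some (c.1 : Int))
  if c.2 then
    -- current = (current + chunk)[:-1] + delimiter
    (st.1, PySem.List.slice (st.2.1 ++ chunk) none (some (-1)) ++ d, c.1 + d.length)
  else
    (st.1 ++ [st.2.1 ++ chunk], [], c.1 + d.length)

def split_text_by_delimiter_alt (text : String) (delimiter : String) : List String :=
  let t := text.toList
  let d := delimiter.toList
  let st := (occsB_split t d 0).foldl (stepB_split t d) ([], [], 0)
  -- current += text[prev:]
  let cur := st.2.1 ++ PySem.List.slice t (some (st.2.2 : Int)) none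
  (if cur ≠ [] then st.1 ++ [cur] else st.1).map fun l => String.ofList l

-- ===== PRECONDITION & SPEC =====
-- Pre_ excludes the empty delimiter together with nonempty text: there the Python A never
-- advances i and loops forever (it never returns a value).
def Pre_split_text_by_delimiter (text : String) (delimiter : String) : Prop :=
  delimiter ≠ "" ∨ text = ""
instance (text : String) (delimiter : String) : Decidable (Pre_split_text_by_delimiter text delimiter) := by
  unfold Pre_split_text_by_delimiter; infer_instance

def pvWitness_split_text_by_delimiter : String × String := ("a,b\\,c", ",")

def Spec_split_text_by_delimiter (text : String) (delimiter : String) (out : List String) : Prop := out = split_text_by_delimiter_alt text delimiter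
instance (text : String) (delimiter : String) (out : List String) : Decidable (Spec_split_text_by_delimiter text delimiter out) := by unfold Spec_split_text_by_delimiter; infer_instance

-- ===== CLAIM (what is proved, stated in full; the proofs are below) =====
def Claim_equal_split_text_by_delimiter : Prop := ∀ (text : String) (delimiter : String), Dom_split_text_by_delimiter text delimiter → Pre_split_text_by_delimiter text delimiter → Spec_split_text_by_delimiter text delimiter (split_text_by_delimiter text delimiter)

-- ===== LEMMAS AND PROOFS =====

-- A's per-position match test is the prefix test at that position.
lemma sliceA_eq_iff (t d : List Char) (i : Nat) :
    (PySem.List.slice t (some (i : Int)) (some ((i : Int) + (d.length : Int))) = d) ↔ d <+: t.drop i := by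
  rw [PySem.List.slice_natCast_add, List.prefix_iff_eq_take]
  exact ⟨fun h => h.symm, fun h => h.symm⟩

-- Running A across a match-free region appends that region to `current` wholesale.
lemma loopA_skip (t d : List Char) (hd : d ≠ []) :
    ∀ m i parts cur, i + m ≤ t.length →
      (∀ p, i ≤ p → p < i + m → ¬ d <+: t.drop p) →
      loopA_split t d i parts cur = loopA_split t d (i + m) parts (cur ++ (t.drop i).take m) := by
  intro m
  induction m with
  | zero => intro i parts cur _ _; simp
  | succ m ih =>
    intro i parts cur hle hfree
    have hi : i < t.length := by omega
    have hnp : ¬ d <+: t.drop i := hfree i (le_refl _) (by omega)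
    rw [loopA_split]
    rw [dif_neg hd, dif_pos hi, if_neg (by rw [sliceA_eq_iff]; exact hnp)]
    have hdropi : t.drop i = t[i] :: t.drop (i + 1) := (List.getElem_cons_drop hi).symm
    rw [ih (i+1) parts (cur ++ [t[i]]) (by omega)
        (fun p hp1 hp2 => hfree p (by omega) (by omega))]
    have harr : i + 1 + m = i + (m + 1) := by omega
    rw [harr]
    rw [hdropi, List.take_succ_cons, List.append_assoc]
    rfl

-- After the last occurrence A just copies the rest of the text.
lemma loopA_tail (t d : List Char) (hd : d ≠ []) :
    ∀ i parts cur, (∀ p, i ≤ p → ¬ d <+: t.drop p) →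
      loopA_split t d i parts cur = (parts, cur ++ t.drop i) := by
  intro i parts cur hfree
  by_cases hi : i < t.length
  · rw [loopA_skip t d hd (t.length - i) i parts cur (by omega)
        (fun p hp1 _ => hfree p hp1)]
    rw [loopA_split]
    rw [dif_neg hd, dif_neg (by omega)]
    rw [List.take_of_length_le (le_of_eq (List.length_drop ..))]
  · rw [loopA_split, dif_neg hd, dif_neg hi]
    rw [List.drop_of_length_le (by omega), List.append_nil]

-- Main invariant: the A loop started at i equals B's fold over the occurrence index from i,
-- finished by appending the tail slice from the final prev.
lemma loop_main (t d : List Char) (hd : d ≠ []) :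
    ∀ n i parts cur, t.length - i ≤ n →
      loopA_split t d i parts cur =
        (let st := (occsB_split t d i).foldl (stepB_split t d) (parts, cur, i)
         (st.1, st.2.1 ++ PySem.List.slice t (some (st.2.2 : Int)) none)) := by
  intro n
  induction n with
  | zero =>
    intro i parts cur hn
    have hi : ¬ i < t.length := by omega
    rw [loopA_split, occsB_split, dif_neg hd, dif_neg hi, dif_neg hd, dif_neg hi]
    simp [PySem.List.slice_from_natCast, List.drop_of_length_le (by omega : t.length ≤ i)]
  | succ n ih =>
    intro i parts cur hn
    by_cases hi : i < t.length
    · have hdlen : 0 < d.length := List.length_pos_iff.mpr hd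
      rw [occsB_split]
      simp only [dif_neg hd, dif_pos hi]
      by_cases hj : PySem.Chars.findFrom t d ((i : Int)) none = -1
      · rw [dif_pos hj]
        simp only [List.foldl_nil, PySem.List.slice_from_natCast]
        apply loopA_tail t d hd
        intro p hp hpre
        have hdp : t.drop p = (t.drop i).drop (p - i) := by
          rw [List.drop_drop]; congr 1; omega
        have hinf : d <:+: t.drop i := by
          rw [hdp] at hpre
          exact hpre.isInfix.trans (List.drop_suffix _ _).isInfix
        exact ((PySem.Chars.findFrom_natCast_eq_neg_one_iff t d i (Nat.le_of_lt hi)).mp hj) hinf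
      · rw [dif_neg hj]
        obtain ⟨hij, hpre, hmin⟩ :=
          PySem.Chars.findFrom_natCast_spec t d i (Nat.le_of_lt hi) hj
        have h0 : (0 : Int) ≤ PySem.Chars.findFrom t d ((i : Int)) none :=
          le_trans (by positivity) hij
        set J := (PySem.Chars.findFrom t d ((i : Int)) none).toNat with hJ
        have hjJ : PySem.Chars.findFrom t d ((i : Int)) none = (J : Int) :=
          (Int.toNat_of_nonneg h0).symm
        have hiJ : i ≤ J := by omega
        have hJlen : J + d.length ≤ t.length := by
          have := hpre.length_le
          rw [List.length_drop] at this
          omega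
        rw [loopA_skip t d hd (J - i) i parts cur (by omega)
            (fun p hp1 hp2 => hmin p hp1 (by omega))]
        have hId : i + (J - i) = J := by omega
        rw [hId]
        rw [loopA_split, dif_neg hd, dif_pos (show J < t.length by omega)]
        rw [if_pos ((sliceA_eq_iff t d J).mpr hpre)]
        rw [List.foldl_cons]
        have hchunk : PySem.List.slice t (some (i : Int)) (some (J : Int)) = (t.drop i).take (J - i) := by
          rw [PySem.List.slice_natCast]
        by_cases hesc : 0 < PySem.Chars.findFrom t d ((i : Int)) none ∧
            PySem.List.pyGet? t (PySem.Chars.findFrom t d ((i : Int)) none - 1) = some '\\'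
        · have hescN : 0 < J ∧ PySem.List.pyGet? t ((J : Int) - 1) = some '\\' := by
            rw [hjJ] at hesc; exact_mod_cast hesc
          rw [if_pos hescN]
          rw [ih (J + d.length) parts (PySem.List.slice (cur ++ (t.drop i).take (J - i)) none (some (-1)) ++ d) (by omega)]
          have hstep : stepB_split t d (parts, cur, i) (J, decide (0 < PySem.Chars.findFrom t d ((i : Int)) none ∧ PySem.List.pyGet? t (PySem.Chars.findFrom t d ((i : Int)) none - 1) = some '\\')) =
              (parts, PySem.List.slice (cur ++ (t.drop i).take (J - i)) none (some (-1)) ++ d, J + d.length) := by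
            simp only [stepB_split, decide_eq_true_eq, if_pos hesc, hchunk]
          rw [hstep]
        · have hescN : ¬ (0 < J ∧ PySem.List.pyGet? t ((J : Int) - 1) = some '\\') := by
            rw [hjJ] at hesc; exact_mod_cast hesc
          rw [if_neg hescN]
          rw [ih (J + d.length) (parts ++ [cur ++ (t.drop i).take (J - i)]) [] (by omega)]
          have hstep : stepB_split t d (parts, cur, i) (J, decide (0 < PySem.Chars.findFrom t d ((i : Int)) none ∧ PySem.List.pyGet? t (PySem.Chars.findFrom t d ((i : Int)) none - 1) = some '\\')) =
              (parts ++ [cur ++ (t.drop i).take (J - i)], [], J + d.length) := by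
            simp only [stepB_split, decide_eq_true_eq, if_neg hesc, hchunk]
          rw [hstep]
    · rw [loopA_split, occsB_split, dif_neg hd, dif_neg hi, dif_neg hd, dif_neg hi]
      simp [PySem.List.slice_from_natCast, List.drop_of_length_le (by omega : t.length ≤ i)]

lemma loopA_nil_d (t : List Char) (i : Nat) (parts : List (List Char)) (cur : List Char) :
    loopA_split t [] i parts cur = (parts, cur) := by
  rw [loopA_split]; simp

lemma occsB_nil_d (t : List Char) (i : Nat) : occsB_split t [] i = [] := by
  rw [occsB_split]; simp

-- ===== VERDICT (by name: the statement is the Claim_ definition above) =====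
theorem split_text_by_delimiter_spec : Claim_equal_split_text_by_delimiter := by
  intro text delimiter _hdom hpre
  unfold Spec_split_text_by_delimiter split_text_by_delimiter split_text_by_delimiter_alt
  rcases hpre with h | h
  · have hd : delimiter.toList ≠ [] := by
      intro hc
      exact h (by simpa using congrArg String.ofList hc)
    simp only []
    rw [loop_main text.toList delimiter.toList hd text.toList.length 0 [] [] (by omega)]
  · subst h
    by_cases hdl : delimiter.toList = []
    · rw [hdl]
      simp [loopA_nil_d, occsB_nil_d]
    · rw [loop_main "".toList delimiter.toList hdl 0 0 [] [] (by simp)]
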